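-- pv_equiv track=rewrite | github.com/thealper2/codewars-solutions | 7-kyu/capitals_first.py | capitals_first
-- ===== SOURCE A (Python) =====
-- def capitals_first(text):
--     uppers = []
--     lowers = []
--     words = text.split()
--     for word in words:
--         if word[0].isalpha():
--             if word[0].isupper():
--                 uppers.append(word)
--             else:
--                 lowers.append(word)
--
--     return ' '.join(uppers + lowers)
-- ===== SOURCE B (Python) =====
-- def capitals_first(text):
--     words = [w for w in text.split() if w[0].isalpha()]
--     return ' '.join(sorted(words, key=lambda w: not w[0].isupper()))
-- ===== Notes on version B (the rewrite author's own statement) =====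
-- stated objective: idiomatic
-- what changed: Replaces A's two-bucket partition loop by a comprehension filter plus one stable sort keyed on capitalization, relying on sort stability to keep intra-group order.
import Mathlib
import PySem

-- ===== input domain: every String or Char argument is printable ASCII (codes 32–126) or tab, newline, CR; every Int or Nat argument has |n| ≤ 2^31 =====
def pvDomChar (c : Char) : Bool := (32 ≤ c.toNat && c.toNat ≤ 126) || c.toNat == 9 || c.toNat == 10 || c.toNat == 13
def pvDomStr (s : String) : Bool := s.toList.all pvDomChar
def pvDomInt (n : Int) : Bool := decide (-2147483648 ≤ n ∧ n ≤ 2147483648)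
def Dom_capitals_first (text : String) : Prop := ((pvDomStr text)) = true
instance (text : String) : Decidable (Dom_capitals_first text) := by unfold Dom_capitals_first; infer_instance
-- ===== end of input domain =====

-- B replaces A's two-bucket partition loop by a filter plus one stable sort keyed on
-- capitalisation (objective: idiomatic); same return value on every input.


-- first character tests; the [] branch is unreachable for words of str.split(), which are nonempty
def pvFirstAlpha (w : String) : Bool :=
  match w.toList with
  | [] => false
  | c :: _ => PySem.Chars.isalpha c

def pvFirstUpper (w : String) : Bool :=
  match w.toList with
  | [] => false
  | c :: _ => PySem.Chars.isupper c

-- ===== PORT A =====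
-- the loop body: 'if word[0].isalpha(): (append to uppers / lowers)' on the pair (uppers, lowers)
def capitalsStep (acc : List String × List String) (word : String) : List String × List String :=
  if pvFirstAlpha word then
    (if pvFirstUpper word then (acc.1 ++ [word], acc.2) else (acc.1, acc.2 ++ [word]))
  else acc

def capitals_first (text : String) : String :=
  let words := PySem.Str.split₀ text
  let ul := words.foldl capitalsStep ([], [])
  PySem.Str.join " " (ul.1 ++ ul.2)

-- ===== PORT B =====
def capitals_first_alt (text : String) : String :=
  let words := (PySem.Str.split₀ text).filter (fun w => pvFirstAlpha w)
  PySem.Str.join " " (PySem.List.sorted words (fun w => !pvFirstUpper w) false)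

-- ===== PRECONDITION & SPEC =====
def Spec_capitals_first (text : String) (out : String) : Prop := out = capitals_first_alt text
instance (text : String) (out : String) : Decidable (Spec_capitals_first text out) := by unfold Spec_capitals_first; infer_instance

-- ===== CLAIM (what is proved, stated in full; the proofs are below) =====
def Claim_equal_capitals_first : Prop := ∀ (text : String), Dom_capitals_first text → Spec_capitals_first text (capitals_first text)

-- ===== LEMMAS AND PROOFS =====

-- A's partition loop, with both accumulators generalised
theorem capitals_loop (ws : List String) (u l : List String) :
    ws.foldl capitalsStep (u, l)
      = (u ++ ws.filter (fun w => pvFirstAlpha w && pvFirstUpper w),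
         l ++ ws.filter (fun w => pvFirstAlpha w && !pvFirstUpper w)) := by
  induction ws generalizing u l with
  | nil => simp
  | cons w ws ih =>
    simp only [List.foldl_cons, List.filter_cons, capitalsStep]
    by_cases ha : pvFirstAlpha w <;> by_cases hu : pvFirstUpper w <;>
      simp [ha, hu, ih]

-- stable insertion of a false-key element into "falses ++ trues": it lands between the blocks
theorem insertBy_bool_false {α : Type} (k : α → Bool) (x : α) (A B : List α)
    (hA : ∀ a ∈ A, k a = false) (hB : ∀ b ∈ B, k b = true) (hx : k x = false) :
    PySem.List.insertBy (fun a b => decide (k a < k b)) x (A ++ B) = A ++ x :: B := by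
  induction A with
  | nil =>
    cases B with
    | nil => rfl
    | cons b bs =>
      have hb := hB b (by simp)
      simp [PySem.List.insertBy, hx, hb]
  | cons a as ih =>
    have ha := hA a (by simp)
    simp only [List.cons_append, PySem.List.insertBy, hx, ha]
    simp [ih (fun a h => hA a (List.mem_cons_of_mem _ h))]

-- stable insertion of a true-key element: it goes to the very end
theorem insertBy_bool_true {α : Type} (k : α → Bool) (x : α) (ys : List α)
    (hx : k x = true) :
    PySem.List.insertBy (fun a b => decide (k a < k b)) x ys = ys ++ [x] := by
  apply PySem.List.insertBy_of_forall_not_before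
  intro y _
  cases k y <;> simp [hx]

-- the insertion-sort fold on a Bool key keeps "falses ++ trues", each block in input order
theorem foldl_insertBy_bool {α : Type} (k : α → Bool) (xs A B : List α)
    (hA : ∀ a ∈ A, k a = false) (hB : ∀ b ∈ B, k b = true) :
    xs.foldl (fun acc x => PySem.List.insertBy (fun a b => decide (k a < k b)) x acc) (A ++ B)
      = (A ++ xs.filter (fun a => !k a)) ++ (B ++ xs.filter k) := by
  induction xs generalizing A B with
  | nil => simp
  | cons x xs ih =>
    simp only [List.foldl_cons, List.filter_cons]
    cases hx : k x with
    | false =>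
      rw [insertBy_bool_false k x A B hA hB hx]
      have := ih (A ++ [x]) B
        (by intro a h; rcases List.mem_append.1 h with h | h
            · exact hA a h
            · simpa [List.mem_singleton.1 h] using hx) hB
      simpa [hx] using this
    | true =>
      rw [insertBy_bool_true k x (A ++ B) hx, show (A ++ B) ++ [x] = A ++ (B ++ [x]) by simp]
      have := ih A (B ++ [x]) hA
        (by intro b h; rcases List.mem_append.1 h with h | h
            · exact hB b h
            · simpa [List.mem_singleton.1 h] using hx)
      simpa [hx] using this

-- Python's stable sort on a Bool key is exactly the two-block partition
theorem sorted_bool_key {α : Type} (k : α → Bool) (xs : List α) :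
    PySem.List.sorted xs k false = xs.filter (fun a => !k a) ++ xs.filter k := by
  rw [PySem.List.sorted_eq_foldl_insertBy]
  simpa using foldl_insertBy_bool k xs [] [] (by simp) (by simp)

-- ===== VERDICT (by name: the statement is the Claim_ definition above) =====
theorem capitals_first_spec : Claim_equal_capitals_first := by
  intro text _
  show capitals_first text = capitals_first_alt text
  unfold capitals_first capitals_first_alt
  simp only [capitals_loop, sorted_bool_key, List.nil_append, Bool.not_not, List.filter_filter]
  simp [Bool.and_comm]
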